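-- pv_equiv track=rewrite | github.com/tsurubaso/Muzifi | testboken.py | detect_chord_name
-- ===== SOURCE A (Python) =====
-- european_notes = ['Do', 'Do#', 'Ré', 'Ré#', 'Mi', 'Fa', 'Fa#', 'Sol', 'Sol#', 'La', 'La#', 'Si']
--
-- def detect_chord_name(pitches):
--     if len(pitches) < 3:
--         return "N/A"
--     pitch_classes = sorted(set([p % 12 for p in pitches]))
--     for root in range(12):
--         maj = sorted([(root + i) % 12 for i in [0, 4, 7]])
--         min_ = sorted([(root + i) % 12 for i in [0, 3, 7]])
--         if pitch_classes == maj: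
--             return european_notes[root] + " majeur"
--         if pitch_classes == min_:
--             return european_notes[root] + " mineur"
--     return "Autre"
-- ===== SOURCE B (Python) =====
-- european_notes = ['Do', 'Do#', 'Ré', 'Ré#', 'Mi', 'Fa', 'Fa#', 'Sol', 'Sol#', 'La', 'La#', 'Si']
--
-- def detect_chord_name(pitches):
--     if len(pitches) < 3:
--         return "N/A"
--     pcs = sorted(set(p % 12 for p in pitches))
--     if len(pcs) != 3:
--         return "Autre"
--     a, b, c = pcs
--     rots = [(a, b - a, c - b, a + 12 - c),
--             (b, c - b, a + 12 - c, b - a),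
--             (c, a + 12 - c, b - a, c - b)]
--     for root, g1, g2, g3 in rots:
--         if (g1, g2, g3) == (4, 3, 5):
--             return european_notes[root] + " majeur"
--         if (g1, g2, g3) == (3, 4, 5):
--             return european_notes[root] + " mineur"
--     return "Autre"
-- ===== Notes on version B (the rewrite author's own statement) =====
-- stated objective: simpler
-- what changed: Replaces the 12-root brute-force loop that builds and sorts two candidate triads per root with direct interval analysis: compute the cyclic gaps of the sorted pitch-class triple and match their three rotations against the major and minor gap patterns.
import Mathlib
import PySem

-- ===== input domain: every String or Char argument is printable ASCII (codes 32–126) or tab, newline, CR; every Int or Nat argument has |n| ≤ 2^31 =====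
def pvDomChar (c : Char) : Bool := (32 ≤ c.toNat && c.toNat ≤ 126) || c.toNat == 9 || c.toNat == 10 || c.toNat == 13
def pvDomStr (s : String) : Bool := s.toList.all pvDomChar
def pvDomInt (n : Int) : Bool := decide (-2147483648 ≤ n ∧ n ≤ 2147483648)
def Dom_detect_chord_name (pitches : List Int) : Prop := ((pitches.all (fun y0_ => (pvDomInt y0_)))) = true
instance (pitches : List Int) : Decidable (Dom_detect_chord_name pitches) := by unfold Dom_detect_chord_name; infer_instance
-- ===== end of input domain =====

-- B replaces A's 12-root brute-force triad matching by direct cyclic-interval analysis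
-- of the three pitch classes (objective: simpler).

def europeanNotes : List String :=
  ["Do", "Do#", "Ré", "Ré#", "Mi", "Fa", "Fa#", "Sol", "Sol#", "La", "La#", "Si"]

-- ===== PORT A =====
-- the 'for root in range(12)' loop with its early returns, as recursion over the roots
def chordLoopA (pc : List Int) : List Int → String
  | [] => "Autre"
  | root :: rs =>
    let maj := PySem.List.sorted (([0, 4, 7] : List Int).map (fun i => PySem.Int.mod (root + i) 12)) (fun x => x) false
    let min_ := PySem.List.sorted (([0, 3, 7] : List Int).map (fun i => PySem.Int.mod (root + i) 12)) (fun x => x) false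
    if pc = maj then PySem.List.pyGetD europeanNotes root "" ++ " majeur"
    else if pc = min_ then PySem.List.pyGetD europeanNotes root "" ++ " mineur"
    else chordLoopA pc rs

def detect_chord_name (pitches : List Int) : String :=
  if pitches.length < 3 then "N/A"
  else
    let pitch_classes := PySem.List.sorted (PySem.Set.ofList (pitches.map (fun p => PySem.Int.mod p 12))) (fun x => x) false
    chordLoopA pitch_classes (PySem.List.pyRange 0 12 1)

-- ===== PORT B =====
-- the 'for root, g1, g2, g3 in rots' loop with its early returns, as recursion over rots
def rotLoopB : List (Int × Int × Int × Int) → String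
  | [] => "Autre"
  | (root, g1, g2, g3) :: rest =>
    if (g1, g2, g3) = ((4 : Int), (3 : Int), (5 : Int)) then PySem.List.pyGetD europeanNotes root "" ++ " majeur"
    else if (g1, g2, g3) = ((3 : Int), (4 : Int), (5 : Int)) then PySem.List.pyGetD europeanNotes root "" ++ " mineur"
    else rotLoopB rest

def detect_chord_name_alt (pitches : List Int) : String :=
  if pitches.length < 3 then "N/A"
  else
    let pcs := PySem.List.sorted (PySem.Set.ofList (pitches.map (fun p => PySem.Int.mod p 12))) (fun x => x) false
    match pcs with
    | [a, b, c] =>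
      rotLoopB [(a, b - a, c - b, a + 12 - c),
                (b, c - b, a + 12 - c, b - a),
                (c, a + 12 - c, b - a, c - b)]
    | _ => "Autre"

-- ===== PRECONDITION & SPEC =====
def Spec_detect_chord_name (pitches : List Int) (out : String) : Prop := out = detect_chord_name_alt pitches
instance (pitches : List Int) (out : String) : Decidable (Spec_detect_chord_name pitches out) := by unfold Spec_detect_chord_name; infer_instance

-- ===== CLAIM (what is proved, stated in full; the proofs are below) =====
def Claim_equal_detect_chord_name : Prop := ∀ (pitches : List Int), Dom_detect_chord_name pitches → Spec_detect_chord_name pitches (detect_chord_name pitches)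

-- ===== LEMMAS AND PROOFS =====

-- A's loop returns "Autre" whenever pc has fewer or more than three elements,
-- since every candidate triad list has length 3.
theorem chordLoopA_ne_three (pc : List Int) (rs : List Int) (h : pc.length ≠ 3) :
    chordLoopA pc rs = "Autre" := by
  induction rs with
  | nil => rfl
  | cons r rs ih =>
    simp only [chordLoopA]
    split_ifs with h1 h2
    · exact absurd (congrArg List.length h1) (by simpa using h)
    · exact absurd (congrArg List.length h2) (by simpa using h)
    · exact ih

-- the finite core: on every strictly increasing triple of classes the two loops agree
theorem core_eq_fin : ∀ x y z : Fin 12, x < y → y < z →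
    chordLoopA [(x : Int), (y : Int), (z : Int)] (PySem.List.pyRange 0 12 1) =
      rotLoopB [((x : Int), (y : Int) - x, (z : Int) - y, (x : Int) + 12 - z),
                ((y : Int), (z : Int) - y, (x : Int) + 12 - z, (y : Int) - x),
                ((z : Int), (x : Int) + 12 - z, (y : Int) - x, (z : Int) - y)] := by
  decide

theorem detect_chord_name_eq (pitches : List Int) :
    detect_chord_name pitches = detect_chord_name_alt pitches := by
  unfold detect_chord_name detect_chord_name_alt
  split_ifs with hlen
  · rfl
  · set pc := PySem.List.sorted (PySem.Set.ofList (pitches.map (fun p => PySem.Int.mod p 12))) (fun x => x) false with hpc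
    have hbound : ∀ x ∈ pc, 0 ≤ x ∧ x < 12 := by
      intro x hx
      have hx' : x ∈ pitches.map (fun p => PySem.Int.mod p 12) := by
        have := (PySem.List.mem_sorted (xs := PySem.Set.ofList (pitches.map (fun p => PySem.Int.mod p 12)))
          (key := fun x => x) (rev := false) (x := x)).mp (hpc ▸ hx)
        exact (PySem.Set.mem_ofList _ _).mp this
      obtain ⟨p, _, hpe⟩ := List.mem_map.mp hx'
      subst hpe
      exact ⟨PySem.Int.mod_nonneg _ (by norm_num), PySem.Int.mod_lt _ (by norm_num)⟩
    have hsorted : pc.Pairwise (· < ·) := hpc ▸ PySem.List.sorted_ofList_pairwise_lt _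
    match hshape : pc with
    | [a, b, c] =>
      have ha := hbound a (by simp)
      have hb := hbound b (by simp)
      have hc := hbound c (by simp)
      have hab : a < b := by
        have := List.pairwise_cons.mp hsorted
        exact this.1 b (by simp)
      have hbc : b < c := by
        have := List.pairwise_cons.mp (List.pairwise_cons.mp hsorted).2
        exact this.1 c (by simp)
      have hxa : a = ((⟨a.toNat, by omega⟩ : Fin 12) : Int) := by simp [Int.toNat_of_nonneg ha.1]
      have hxb : b = ((⟨b.toNat, by omega⟩ : Fin 12) : Int) := by simp [Int.toNat_of_nonneg hb.1]
      have hxc : c = ((⟨c.toNat, by omega⟩ : Fin 12) : Int) := by simp [Int.toNat_of_nonneg hc.1]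
      rw [hxa, hxb, hxc]
      exact core_eq_fin _ _ _ (by simp [Fin.lt_def]; omega) (by simp [Fin.lt_def]; omega)
    | [] => exact chordLoopA_ne_three _ _ (by simp)
    | [a] => exact chordLoopA_ne_three _ _ (by simp)
    | [a, b] => exact chordLoopA_ne_three _ _ (by simp)
    | a :: b :: c :: d :: rest => exact chordLoopA_ne_three _ _ (by simp)

-- ===== VERDICT (by name: the statement is the Claim_ definition above) =====
theorem detect_chord_name_spec : Claim_equal_detect_chord_name := by
  intro pitches _
  exact detect_chord_name_eq pitches
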